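-- pv_equiv track=rewrite | github.com/BugChef/yandex_alghoritms | sprint1/final/nearest_zero.py | get_numbers_between_zeroes
-- ===== SOURCE A (Python) =====
-- def get_numbers_between_zeroes(n):
--     is_even = n % 2 == 0
--     mid = n // 2 if is_even else n // 2 + 1
--     if is_even:
--         half = [i for i in range(1, mid + 1)]
--         return half + half[::-1]
--     else:
--         half = [i for i in range(1, mid)]
--         return half + [mid] + half[::-1]
-- ===== SOURCE B (Python) =====
-- def get_numbers_between_zeroes(n):
--     return [min(i + 1, n - i) for i in range(n)]
-- ===== Notes on version B (the rewrite author's own statement) =====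
-- stated objective: idiomatic
-- what changed: Replaces the even/odd branch that builds a half list and mirrors it (half + [mid] + half[::-1]) with a single comprehension computing each position directly as min(i+1, n-i).
-- intended difference: For negative odd n, A returns the one-element list [n//2 + 1] (e.g. [0] for n=-1), an accident of its empty-half construction; B returns the empty list, the intended value since the mountain list has max(n,0) elements. — e.g. on get_numbers_between_zeroes(-1): A returns [0], B returns []
import Mathlib
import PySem

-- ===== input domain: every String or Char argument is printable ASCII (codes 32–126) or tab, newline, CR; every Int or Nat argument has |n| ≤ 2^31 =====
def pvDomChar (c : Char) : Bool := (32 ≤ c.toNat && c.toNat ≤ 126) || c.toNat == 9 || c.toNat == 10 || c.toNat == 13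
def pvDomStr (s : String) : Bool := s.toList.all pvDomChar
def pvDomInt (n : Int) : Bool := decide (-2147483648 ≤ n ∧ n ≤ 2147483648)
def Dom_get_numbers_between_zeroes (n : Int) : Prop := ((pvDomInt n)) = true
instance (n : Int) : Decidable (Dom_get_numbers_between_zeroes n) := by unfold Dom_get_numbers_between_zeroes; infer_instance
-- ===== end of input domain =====

-- B replaces A's half-build-and-mirror (even/odd branch, half + [mid] + half[::-1]) with a
-- single comprehension min(i+1, n-i) per position: same values, a different construction.

-- ===== PORT A =====
def get_numbers_between_zeroes (n : Int) : List Int :=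
  let is_even := PySem.Int.mod n 2 == 0
  let mid := if is_even then PySem.Int.floordiv n 2 else PySem.Int.floordiv n 2 + 1
  if is_even then
    let half := PySem.List.pyRange 1 (mid + 1) 1
    half ++ ((PySem.List.slice? half none none (-1)).getD [])   -- half[::-1]; slice? never none for step -1
  else
    let half := PySem.List.pyRange 1 mid 1
    half ++ [mid] ++ ((PySem.List.slice? half none none (-1)).getD [])

-- ===== PORT B =====
def get_numbers_between_zeroes_alt (n : Int) : List Int :=
  (PySem.List.pyRange 0 n 1).map (fun i => min (i + 1) (n - i))

-- ===== PRECONDITION & SPEC =====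
-- For negative odd n, A returns the one-element list [n//2 + 1] (e.g. [0] for n = -1), an
-- accident of its empty-half construction; B returns [], the intended value (the mountain
-- list has max(n,0) elements).
def D_get_numbers_between_zeroes (n : Int) : Prop := n < 0 ∧ ¬ (2 ∣ n)
instance (n : Int) : Decidable (D_get_numbers_between_zeroes n) := by unfold D_get_numbers_between_zeroes; infer_instance

def Spec_get_numbers_between_zeroes (n : Int) (out : List Int) : Prop := ¬ D_get_numbers_between_zeroes n → out = get_numbers_between_zeroes_alt n
instance (n : Int) (out : List Int) : Decidable (Spec_get_numbers_between_zeroes n out) := by unfold Spec_get_numbers_between_zeroes; infer_instance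

def pvDiffWitness_get_numbers_between_zeroes : Int := -1
def pvDiffWitnessOut_get_numbers_between_zeroes : (List Int) × (List Int) := ([0], [])

-- ===== CLAIM (what is proved, stated in full; the proofs are below) =====
def Claim_unchanged_get_numbers_between_zeroes : Prop := ∀ (n : Int), Dom_get_numbers_between_zeroes n → Spec_get_numbers_between_zeroes n (get_numbers_between_zeroes n)
def Claim_changed_get_numbers_between_zeroes : Prop := Dom_get_numbers_between_zeroes (pvDiffWitness_get_numbers_between_zeroes) ∧ D_get_numbers_between_zeroes (pvDiffWitness_get_numbers_between_zeroes) ∧ get_numbers_between_zeroes (pvDiffWitness_get_numbers_between_zeroes) = pvDiffWitnessOut_get_numbers_between_zeroes.1 ∧ get_numbers_between_zeroes_alt (pvDiffWitness_get_numbers_between_zeroes) = pvDiffWitnessOut_get_numbers_between_zeroes.2 ∧ pvDiffWitnessOut_get_numbers_between_zeroes.1 ≠ pvDiffWitnessOut_get_numbers_between_zeroes.2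
def Claim_exact_get_numbers_between_zeroes : Prop := ∀ (n : Int), Dom_get_numbers_between_zeroes n → D_get_numbers_between_zeroes n → get_numbers_between_zeroes n ≠ get_numbers_between_zeroes_alt n

-- ===== LEMMAS AND PROOFS =====

theorem pv_A_even (n : Int) (h : 2 ∣ n) :
    get_numbers_between_zeroes n =
      PySem.List.pyRange 1 (n / 2 + 1) 1 ++ (PySem.List.pyRange 1 (n / 2 + 1) 1).reverse := by
  simp [get_numbers_between_zeroes, h, PySem.List.slice?_none_none_neg_one]

theorem pv_A_odd (n : Int) (h : ¬ 2 ∣ n) :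
    get_numbers_between_zeroes n =
      PySem.List.pyRange 1 (n / 2 + 1) 1 ++ [n / 2 + 1] ++
        (PySem.List.pyRange 1 (n / 2 + 1) 1).reverse := by
  simp [get_numbers_between_zeroes, h, PySem.List.slice?_none_none_neg_one]

theorem pv_B_eq (n : Int) :
    get_numbers_between_zeroes_alt n =
      (List.range n.toNat).map (fun (k : Nat) => min ((k : Int) + 1) (n - (k : Int))) := by
  unfold get_numbers_between_zeroes_alt
  rw [PySem.List.pyRange_one, List.map_map]
  simp only [Function.comp_def, zero_add, sub_zero]

theorem pv_half_eq (m : Nat) :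
    PySem.List.pyRange 1 ((m : Int) + 1) 1 =
      (List.range m).map (fun (k : Nat) => (k : Int) + 1) := by
  rw [PySem.List.pyRange_one]
  have hm : (((m : Int) + 1 - 1).toNat) = m := by omega
  rw [hm]
  exact List.map_congr_left (fun k _ => by ring)

theorem pv_unchanged (n : Int) (h : ¬ (n < 0 ∧ ¬ (2 ∣ n))) :
    get_numbers_between_zeroes n = get_numbers_between_zeroes_alt n := by
  rcases lt_or_ge n 0 with hneg | hpos
  · -- negative, hence even by h: everything is empty
    have hdvd : 2 ∣ n := by tauto
    rw [pv_A_even n hdvd, pv_B_eq]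
    have h1 : n / 2 + 1 ≤ 1 := by omega
    rw [PySem.List.pyRange_one_eq_nil h1]
    have : n.toNat = 0 := by omega
    simp [this]
  · -- n ≥ 0
    obtain ⟨N, rfl⟩ : ∃ N : Nat, n = (N : Int) := ⟨n.toNat, by omega⟩
    have hf : (N : Int) / 2 = ((N / 2 : Nat) : Int) := by omega
    have hB := pv_B_eq (N : Int)
    set m := N / 2 with hm
    by_cases hdvd : 2 ∣ (N : Int)
    · -- even: N = 2*m
      have hN : N = 2 * m := by
        have : (2 : Int) ∣ (N : Int) := hdvd
        have h2 : 2 ∣ N := by exact_mod_cast this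
        omega
      rw [pv_A_even _ hdvd, hf, pv_half_eq m, hB]
      apply List.ext_getElem
      · simp [hN]; omega
      · intro i h1 h2
        simp only [List.length_map, List.length_range, Int.toNat_natCast] at h2
        by_cases hi : i < m
        · rw [List.getElem_append_left (by simpa using hi),
            List.getElem_map, List.getElem_range, List.getElem_map, List.getElem_range]
          have : (i : Int) + 1 ≤ (N : Int) - i := by omega
          omega
        · rw [List.getElem_append_right (by simpa using hi)]
          simp only [List.length_map, List.length_range, List.getElem_reverse,
            List.getElem_map, List.getElem_range]
          have : (N : Int) - i ≤ (i : Int) + 1 := by omega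
          rw [min_eq_right this]
          omega
    · -- odd: N = 2*m + 1
      have hN : N = 2 * m + 1 := by
        have h2 : ¬ 2 ∣ N := fun hc => hdvd (by exact_mod_cast (Int.natCast_dvd_natCast.mpr hc))
        omega
      rw [pv_A_odd _ hdvd, hf, pv_half_eq m, hB]
      apply List.ext_getElem
      · simp [hN]; omega
      · intro i h1 h2
        simp only [List.length_map, List.length_range, Int.toNat_natCast] at h2
        rw [List.getElem_map, List.getElem_range]
        by_cases hi : i < m
        · rw [List.getElem_append_left (by simp; omega),
            List.getElem_append_left (by simpa using hi),
            List.getElem_map, List.getElem_range]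
          have : (i : Int) + 1 ≤ (N : Int) - i := by omega
          omega
        · by_cases him : i = m
          · subst him
            rw [List.getElem_append_left (by simp), List.getElem_append_right (by simp)]
            simp only [List.length_map, List.length_range]
            have : (m : Int) + 1 ≤ (N : Int) - m := by omega
            simp only [Nat.sub_self, List.getElem_singleton]
            omega
          · rw [List.getElem_append_right (by simp; omega)]
            simp only [List.length_append, List.length_map, List.length_range,
              List.length_singleton, List.getElem_reverse, List.getElem_map, List.getElem_range]
            have : (N : Int) - i ≤ (i : Int) + 1 := by omega
            rw [min_eq_right this]
            omega

-- ===== VERDICT (by name: the statement is the Claim_ definition above) =====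
theorem get_numbers_between_zeroes_spec : Claim_unchanged_get_numbers_between_zeroes := by
  intro n _ hD
  exact pv_unchanged n (by unfold D_get_numbers_between_zeroes at hD; exact hD)

theorem get_numbers_between_zeroes_changed : Claim_changed_get_numbers_between_zeroes := by
  unfold Claim_changed_get_numbers_between_zeroes; decide

theorem get_numbers_between_zeroes_tight : Claim_exact_get_numbers_between_zeroes := by
  intro n _ hD
  obtain ⟨hneg, hodd⟩ := hD
  rw [pv_A_odd n hodd]
  have h1 : n / 2 + 1 ≤ 1 := by omega
  rw [PySem.List.pyRange_one_eq_nil h1]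
  have hB : get_numbers_between_zeroes_alt n = [] := by
    rw [pv_B_eq]
    have : n.toNat = 0 := by omega
    simp [this]
  simp [hB]
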